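-- pv_equiv track=rewrite | github.com/pypi-data/pypi-mirror-402 | packages/adrf-flex-fields/adrf_flex_fields-0.1.0-py3-none-any.whl/adrf_flex_fields/utils.py | split_levels
-- ===== SOURCE A (Python) =====
-- from typing import Dict, List, Tuple
--
-- def split_levels(fields: List[str]) -> Tuple[List[str], Dict[str, List[str]]]:
--     """
--     Sépare les champs par niveau pour l'expansion imbriquée.
--
--     Parse dot-notation field paths and split them into current level fields
--     and next level mappings for nested expansion.
--
--     Args:
--         fields: Liste de champs avec notation par points (e.g., ['country', 'country.states'])
--
--     Returns:
--         Tuple de (champs de niveau actuel, dict des champs de niveau suivant)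
--
--     Example:
--         >>> split_levels(['country', 'country.states', 'friends.hobbies'])
--         (['country', 'friends'], {'country': ['states'], 'friends': ['hobbies']})
--     """
--     if not fields:
--         return [], {}
--
--     current_level = []
--     next_level = {}
--
--     for field in fields:
--         if not field:  # Skip empty strings
--             continue
--
--         parts = field.split('.', 1)
--         current_level.append(parts[0])
--
--         if len(parts) > 1:
--             if parts[0] not in next_level:
--                 next_level[parts[0]] = []
--             next_level[parts[0]].append(parts[1])
--
--     # Remove duplicates while preserving order
--     seen = set()
--     current_level_unique = []
--     for item in current_level:
--         if item not in seen:
--             seen.add(item)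
--             current_level_unique.append(item)
--
--     return current_level_unique, next_level
-- ===== SOURCE B (Python) =====
-- from typing import Dict, List, Tuple
--
-- def split_levels(fields: List[str]) -> Tuple[List[str], Dict[str, List[str]]]:
--     """Staged comprehensions: split everything once, dedup the heads with
--     dict.fromkeys, then build the nested mapping by grouping the dotted
--     entries with a per-key scan (dict comprehension keeps first-occurrence
--     key order)."""
--     parts = [f.split('.', 1) for f in fields if f]
--     current = list(dict.fromkeys(p[0] for p in parts))
--     dotted = [p for p in parts if len(p) > 1]
--     nested = {p[0]: [q[1] for q in dotted if q[0] == p[0]] for p in dotted}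
--     return current, nested
-- ===== Notes on version B (the rewrite author's own statement) =====
-- stated objective: simpler
-- what changed: A runs one mutating loop that appends heads and does a membership-guarded append into the nested dict, then a second seen-set dedup pass; B is staged comprehensions: split every field once, dedup the heads with dict.fromkeys, and build the nested mapping by a grouping dict comprehension whose value is a per-key scan over the dotted entries, with no incremental dict state and no second dedup pass.
import Mathlib
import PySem

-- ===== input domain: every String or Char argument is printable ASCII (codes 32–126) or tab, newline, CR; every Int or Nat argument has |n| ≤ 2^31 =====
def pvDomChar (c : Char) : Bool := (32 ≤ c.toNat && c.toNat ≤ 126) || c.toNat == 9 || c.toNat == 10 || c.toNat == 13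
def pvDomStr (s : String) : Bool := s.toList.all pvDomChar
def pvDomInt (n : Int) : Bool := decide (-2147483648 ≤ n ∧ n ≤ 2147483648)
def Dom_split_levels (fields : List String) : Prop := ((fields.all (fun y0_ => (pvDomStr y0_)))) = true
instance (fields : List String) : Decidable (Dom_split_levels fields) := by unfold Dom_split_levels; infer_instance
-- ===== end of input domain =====

-- B replaces A's mutating loop (append heads + guarded dict append, then a second
-- seen-set dedup pass) by staged comprehensions: split once, dedup heads with
-- dict.fromkeys, and build the nested mapping by a per-key scan over the dotted
-- entries (a grouping dict comprehension); objective: simpler.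

-- ===== PORT A =====
-- loop body of A's main `for field in fields` loop
def stepA (st : List String × PySem.Dict String (List String)) (field : String) :
    List String × PySem.Dict String (List String) :=
  if field = "" then st
  else
    -- parts = field.split('.', 1); the separator "." is nonempty so splitMax? is always `some`
    let parts := (PySem.Str.splitMax? field "." 1).getD []
    let cur := st.1 ++ [PySem.List.pyGetD parts 0 ""]
    if 1 < parts.length then
      let nl := if st.2.contains (PySem.List.pyGetD parts 0 "") then st.2
                else st.2.insert (PySem.List.pyGetD parts 0 "") []
      (cur, nl.modify (PySem.List.pyGetD parts 0 "") [] (fun l => l ++ [PySem.List.pyGetD parts 1 ""]))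
    else (cur, st.2)

-- loop body of A's dedup pass (seen : set, current_level_unique : list)
def stepD (p : PySem.Set String × List String) (item : String) : PySem.Set String × List String :=
  if p.1.contains item then p else (p.1.add item, p.2 ++ [item])

def split_levels (fields : List String) : List String × (List (String × List String)) :=
  if fields = [] then ([], [])
  else
    let st := fields.foldl stepA ([], PySem.Dict.empty)
    let ded := st.1.foldl stepD (([] : PySem.Set String), ([] : List String))
    (ded.2, st.2.items)

-- ===== PORT B =====
def split_levels_alt (fields : List String) : List String × (List (String × List String)) :=
  -- parts = [f.split('.', 1) for f in fields if f]
  let parts := (fields.filter (fun f => !(f == ""))).map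
                 (fun f => (PySem.Str.splitMax? f "." 1).getD [])
  -- current = list(dict.fromkeys(p[0] for p in parts))
  let current := PySem.List.dedup (parts.map (fun p => PySem.List.pyGetD p 0 ""))
  -- dotted = [p for p in parts if len(p) > 1]
  let dotted := parts.filter (fun p => decide (1 < p.length))
  -- nested = {p[0]: [q[1] for q in dotted if q[0] == p[0]] for p in dotted}
  let nested := dotted.foldl (fun d p =>
      d.insert (PySem.List.pyGetD p 0 "")
        (dotted.filterMap (fun q =>
          if PySem.List.pyGetD q 0 "" = PySem.List.pyGetD p 0 ""
          then some (PySem.List.pyGetD q 1 "") else none)))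
    PySem.Dict.empty
  (current, nested.items)

-- ===== PRECONDITION & SPEC =====
def Spec_split_levels (fields : List String) (out : List String × (List (String × List String))) : Prop := out = split_levels_alt fields
instance (fields : List String) (out : List String × (List (String × List String))) : Decidable (Spec_split_levels fields out) := by unfold Spec_split_levels; infer_instance

-- ===== CLAIM (what is proved, stated in full; the proofs are below) =====
def Claim_equal_split_levels : Prop := ∀ (fields : List String), Dom_split_levels fields → Spec_split_levels fields (split_levels fields)

-- ===== LEMMAS AND PROOFS =====

-- (head, rest) at the first '.' of f, or none if f has no dot
def pairDot (f : String) : Option (String × String) :=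
  match f.toList.findIdx? (· == '.') with
  | none => none
  | some i => some (String.ofList (f.toList.take i), String.ofList (f.toList.drop (i + 1)))

def headOf (f : String) : String := match pairDot f with | none => f | some p => p.1

def headsOf (fields : List String) : List String :=
  fields.flatMap (fun f => if f = "" then [] else [headOf f])

def pairsOf (fields : List String) : List (String × String) :=
  fields.flatMap (fun f => if f = "" then []
    else match pairDot f with | none => [] | some p => [p])

def restsOf (ps : List (String × String)) (h : String) : List String :=
  ps.filterMap (fun q => if q.1 = h then some q.2 else none)

def insStep (d : PySem.Dict String (List String)) (p : String × String) :
    PySem.Dict String (List String) :=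
  d.insert p.1 (d.getD p.1 [] ++ [p.2])

theorem go_zero (fuel : Nat) (l cur : List Char) (acc : List (List Char)) :
    PySem.Chars.splitOnMax.go ['.'] fuel 0 l cur acc = ((cur.reverse ++ l) :: acc).reverse := by
  cases fuel with
  | zero => simp [PySem.Chars.splitOnMax.go]
  | succ f => cases l with
    | nil => simp [PySem.Chars.splitOnMax.go]
    | cons c rest => simp [PySem.Chars.splitOnMax.go]

theorem go_one (l : List Char) : ∀ (fuel : Nat) (cur : List Char) (acc : List (List Char)),
    l.length < fuel →
    PySem.Chars.splitOnMax.go ['.'] fuel 1 l cur acc =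
      (match l.findIdx? (· == '.') with
       | none => acc.reverse ++ [cur.reverse ++ l]
       | some i => acc.reverse ++ [cur.reverse ++ l.take i, l.drop (i + 1)]) := by
  induction l with
  | nil =>
    intro fuel cur acc hf
    match fuel, hf with
    | f+1, _ => simp [PySem.Chars.splitOnMax.go]
  | cons c rest ih =>
    intro fuel cur acc hf
    match fuel, hf with
    | f+1, hf =>
      by_cases hc : c = '.'
      · subst hc
        rw [PySem.Chars.splitOnMax.go]
        simp [List.isPrefixOf, go_zero, List.findIdx?_cons]
      · rw [PySem.Chars.splitOnMax.go]
        have hp : (['.'].isPrefixOf (c :: rest)) = false := by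
          simp [List.isPrefixOf, Ne.symm hc]
        simp only [hp, if_neg (by omega : ¬(1 = 0))]
        rw [ih f (c :: cur) acc (by simpa using Nat.lt_of_succ_lt_succ hf)]
        simp [List.findIdx?_cons, hc]
        cases hidx : rest.findIdx? (· == '.') with
        | none => simp
        | some i => simp [List.take_succ_cons]

theorem splitMax_dot (f : String) :
    (PySem.Str.splitMax? f "." 1).getD [] =
      (match pairDot f with
       | none => [f]
       | some p => [p.1, p.2]) := by
  have h1 : ("." : String).toList = ['.'] := by decide
  simp only [PySem.Str.splitMax?, PySem.Chars.splitMax?, h1]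
  simp only [List.isEmpty_cons]
  simp only [PySem.Chars.splitOnMax, if_neg (by omega : ¬(1:Int) < 0)]
  simp only [Int.toNat_one]
  simp only [Bool.false_eq_true, if_false, Option.map_some, Option.getD_some]
  rw [go_one f.toList (f.toList.length + 1) [] [] (by omega)]
  simp only [pairDot]
  cases hidx : f.toList.findIdx? (· == '.') with
  | none => simp
  | some i => simp

-- A's membership-guarded insert-then-modify is one insert of the appended list
theorem nested_step (d : PySem.Dict String (List String)) (h : String) (r : String) :
    (if d.contains h then d else d.insert h []).modify h [] (fun l => l ++ [r])
      = d.insert h (d.getD h [] ++ [r]) := by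
  by_cases hc : d.contains h = true
  · simp [hc, PySem.Dict.modify]
  · have hc' : d.contains h = false := by simpa using hc
    have hkeys : ∀ p ∈ d.items, (p.1 == h) = false := by
      simpa [PySem.Dict.contains, List.any_eq_false] using hc'
    have hfind : d.items.find? (fun p => p.1 == h) = none :=
      List.find?_eq_none.mpr (by intro p hp; simp [hkeys p hp])
    have hgetD : d.getD h [] = [] := by simp [PySem.Dict.getD, PySem.Dict.get?, hfind]
    have hins : d.insert h ([] : List String) = PySem.Dict.mk (d.items ++ [(h, [])]) := by
      simp [PySem.Dict.insert, hc']
    have hcon2 : (PySem.Dict.mk (d.items ++ [(h, ([] : List String))])).contains h = true := by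
      simp [PySem.Dict.contains]
    have hgetD2 : (PySem.Dict.mk (d.items ++ [(h, ([] : List String))])).getD h [] = [] := by
      simp [PySem.Dict.getD, PySem.Dict.get?, List.find?_append, hfind]
    have hmap : d.items.map (fun p => if p.1 = h then (h, [r]) else p) = d.items := by
      have h2 : ∀ p ∈ d.items, (fun p : String × List String => if p.1 = h then (h, [r]) else p) p = id p := by
        intro p hp
        have h3 := hkeys p hp
        simp only [beq_eq_false_iff_ne, ne_eq] at h3
        simp [h3]
      rw [List.map_congr_left h2, List.map_id]
    simp only [hc', Bool.false_eq_true, if_false, PySem.Dict.modify, hins, hgetD2, hgetD]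
    apply PySem.Dict.ext
    simp [PySem.Dict.insert, hcon2, hc', hmap]

-- A's dedup pass is foldl Set.add when seen and the output list coincide
theorem dedup_pass (u : List String) : ∀ (s : List String),
    u.foldl stepD (s, s) = (u.foldl PySem.Set.add s, u.foldl PySem.Set.add s) := by
  induction u with
  | nil => intro s; rfl
  | cons x rest ih =>
    intro s
    rw [List.foldl_cons, List.foldl_cons]
    unfold stepD
    cases hc : PySem.Set.contains s x with
    | false =>
      have hc' : x ∉ s := by simpa [PySem.Set.contains] using hc
      have ha : PySem.Set.add s x = s ++ [x] := by simp [PySem.Set.add, hc']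
      simp only [ha]
      exact ih (s ++ [x])
    | true =>
      have hc' : x ∈ s := by simpa [PySem.Set.contains] using hc
      have ha : PySem.Set.add s x = s := by simp [PySem.Set.add, hc']
      simp only [ha]
      exact ih s

-- A's main loop, decomposed: heads in order, nested dict as a fold over the dotted pairs
theorem A_loop (fields : List String) : ∀ (cur : List String) (nl : PySem.Dict String (List String)),
    fields.foldl stepA (cur, nl) = (cur ++ headsOf fields, (pairsOf fields).foldl insStep nl) := by
  induction fields with
  | nil => intro cur nl; simp [headsOf, pairsOf]
  | cons f rest ih =>
    intro cur nl
    rw [List.foldl_cons]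
    by_cases hf : f = ""
    · have hstep : stepA (cur, nl) f = (cur, nl) := by simp [stepA, hf]
      rw [hstep, ih cur nl]
      simp [headsOf, pairsOf, hf]
    · cases hpd : pairDot f with
      | none =>
        have hparts : (PySem.Str.splitMax? f "." 1).getD [] = [f] := by
          rw [splitMax_dot]; simp [hpd]
        have hstep : stepA (cur, nl) f = (cur ++ [f], nl) := by
          simp [stepA, hf, hparts]
        rw [hstep, ih (cur ++ [f]) nl]
        simp [headsOf, pairsOf, headOf, hpd, hf]
      | some p =>
        have hparts : (PySem.Str.splitMax? f "." 1).getD [] = [p.1, p.2] := by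
          rw [splitMax_dot]; simp [hpd]
        have hstep : stepA (cur, nl) f = (cur ++ [p.1], insStep nl p) := by
          simp only [stepA, if_neg hf, hparts]
          simp only [insStep]
          rw [← nested_step]
          simp [pysem]
        rw [hstep, ih _ _]
        simp only [headsOf, pairsOf, List.flatMap_cons, headOf, hpd]
        simp [hf]

-- heads of B's parts list are A's heads
theorem parts_heads (fields : List String) :
    ((fields.filter (fun f => !(f == ""))).map
      (fun f => (PySem.Str.splitMax? f "." 1).getD [])).map
        (fun p => PySem.List.pyGetD p 0 "") = headsOf fields := by
  induction fields with
  | nil => rfl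
  | cons f rest ih =>
    by_cases hf : f = ""
    · have h1 : headsOf (f :: rest) = headsOf rest := by simp [headsOf, hf]
      rw [h1, List.filter_cons_of_neg (by simp [hf])]
      exact ih
    · rw [List.filter_cons_of_pos (by simp [hf]), List.map_cons, List.map_cons, splitMax_dot]
      cases hpd : pairDot f with
      | none =>
        have h1 : headsOf (f :: rest) = f :: headsOf rest := by
          simp [headsOf, hf, headOf, hpd]
        rw [h1]
        exact List.cons_eq_cons.mpr ⟨rfl, ih⟩
      | some p =>
        have h1 : headsOf (f :: rest) = p.1 :: headsOf rest := by
          simp [headsOf, hf, headOf, hpd]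
        rw [h1]
        exact List.cons_eq_cons.mpr ⟨rfl, ih⟩

-- B's dotted parts are A's pairs, each packed as a two-element list
theorem parts_dotted (fields : List String) :
    ((fields.filter (fun f => !(f == ""))).map
      (fun f => (PySem.Str.splitMax? f "." 1).getD [])).filter
        (fun p => decide (1 < p.length)) = (pairsOf fields).map (fun p => [p.1, p.2]) := by
  induction fields with
  | nil => rfl
  | cons f rest ih =>
    by_cases hf : f = ""
    · have h0 : (f :: rest).filter (fun f => !(f == "")) = rest.filter (fun f => !(f == "")) := by
        simp [hf]
      have h1 : pairsOf (f :: rest) = pairsOf rest := by simp [pairsOf, hf]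
      rw [h0, h1]
      exact ih
    · rw [List.filter_cons_of_pos (by simp [hf]), List.map_cons, splitMax_dot]
      cases hpd : pairDot f with
      | none =>
        have h1 : pairsOf (f :: rest) = pairsOf rest := by simp [pairsOf, hf, hpd]
        rw [h1, List.filter_cons_of_neg (by simp)]
        exact ih
      | some p =>
        have h1 : pairsOf (f :: rest) = p :: pairsOf rest := by simp [pairsOf, hf, hpd]
        rw [h1, List.filter_cons_of_pos (by simp), List.map_cons]
        exact List.cons_eq_cons.mpr ⟨rfl, ih⟩

-- the per-key scan (B's inner comprehension)
theorem rests_eq (ps : List (String × String)) (h : String) :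
    restsOf ps h = ((ps.filter (fun q => q.1 == h)).map (fun q => q.2)) := by
  induction ps with
  | nil => rfl
  | cons q rest ih =>
    by_cases hq : q.1 = h
    · simp [restsOf, hq] at ih ⊢; exact ih
    · simp [restsOf, hq] at ih ⊢; exact ih

-- A's fold: the value stored at k is all rests with head k
theorem getD_A_fold (ps : List (String × String)) (k : String) :
    (ps.foldl insStep PySem.Dict.empty).getD k [] = restsOf ps k := by
  have hmod : ps.foldl insStep PySem.Dict.empty
      = ps.foldl (fun d p => d.modify p.1 [] (fun l => l ++ [p.2])) PySem.Dict.empty := by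
    exact PySem.List.foldl_congr_mem _ _ _ _
      (by intro d p _; simp [insStep, PySem.Dict.modify])
  rw [hmod, PySem.Dict.getD_foldl_modify_append]
  rw [rests_eq]
  simp

-- B's fold of key-determined inserts: lookup is the key's value once the key occurred
theorem getD_B_fold (v : String → List String) (ps : List (String × String)) :
    ∀ (d : PySem.Dict String (List String)) (k : String),
    (ps.foldl (fun d p => d.insert p.1 (v p.1)) d).getD k []
      = if k ∈ ps.map Prod.fst then v k else d.getD k [] := by
  induction ps with
  | nil => intro d k; simp
  | cons p rest ih =>
    intro d k
    rw [List.foldl_cons, ih]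
    by_cases hk : k ∈ rest.map Prod.fst
    · simp [hk]
    · by_cases hkp : k = p.1
      · subst hkp; simp [hk]
      · simp [hk, PySem.Dict.getD_insert, hkp]

-- the two nested-dict folds build the same dict
theorem nested_eq (ps : List (String × String)) :
    ps.foldl insStep PySem.Dict.empty
      = ps.foldl (fun d p => d.insert p.1 (restsOf ps p.1)) PySem.Dict.empty := by
  have hkA : (ps.foldl insStep PySem.Dict.empty).keys
      = PySem.Set.update [] (ps.map Prod.fst) := by
    have := PySem.Dict.keys_foldl_insert_key ps Prod.fst
      (fun d p => d.getD p.1 [] ++ [p.2]) (PySem.Dict.empty : PySem.Dict String (List String))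
    simpa [insStep] using this
  have hkB : (ps.foldl (fun d p => d.insert p.1 (restsOf ps p.1)) PySem.Dict.empty).keys
      = PySem.Set.update [] (ps.map Prod.fst) := by
    have := PySem.Dict.keys_foldl_insert_key ps Prod.fst
      (fun _ p => restsOf ps p.1) (PySem.Dict.empty : PySem.Dict String (List String))
    simpa using this
  have hndA : (ps.foldl insStep PySem.Dict.empty).keys.Nodup := by
    have := PySem.Dict.nodup_keys_foldl_insert_key ps Prod.fst
      (fun d p => d.getD p.1 [] ++ [p.2]) (PySem.Dict.empty : PySem.Dict String (List String))
      (by simp)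
    simpa [insStep] using this
  have hndB : (ps.foldl (fun d p => d.insert p.1 (restsOf ps p.1)) PySem.Dict.empty).keys.Nodup :=
    PySem.Dict.nodup_keys_foldl_insert_key ps Prod.fst _ _ (by simp)
  apply PySem.Dict.ext
  rw [PySem.Dict.items_eq_map_keys _ hndA ([] : List String),
      PySem.Dict.items_eq_map_keys _ hndB ([] : List String), hkA, hkB]
  apply List.map_congr_left
  intro k hk
  have hmem : k ∈ ps.map Prod.fst := by
    have := PySem.Set.ofList_eq_foldl (ps.map Prod.fst)
    have hu : PySem.Set.update ([] : List String) (ps.map Prod.fst)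
        = PySem.Set.ofList (ps.map Prod.fst) := by
      simp [PySem.Set.update, PySem.Set.ofList]
    rw [hu] at hk
    simpa [PySem.Set.mem_ofList] using hk
  rw [getD_A_fold, getD_B_fold]
  simp [hmem]

theorem split_levels_eq (fields : List String) : split_levels fields = split_levels_alt fields := by
  by_cases hnil : fields = []
  · subst hnil; rfl
  · simp only [split_levels, split_levels_alt, if_neg hnil]
    rw [show (([] : PySem.Set String), ([] : List String)) = (([] : List String), ([] : List String)) from rfl]
    simp only [A_loop, List.nil_append, dedup_pass]
    rw [parts_heads, parts_dotted]
    congr 1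
    rw [nested_eq]
    congr 1
    rw [List.foldl_map]
    apply PySem.List.foldl_congr_mem
    intro d p _
    have h0 : ∀ (a b : String), PySem.List.pyGetD [a, b] 0 "" = a := fun a b => rfl
    have h1 : ∀ (a b : String), PySem.List.pyGetD [a, b] 1 "" = b := fun a b => rfl
    rw [h0]
    congr 1
    rw [List.filterMap_map]
    unfold restsOf
    apply List.filterMap_congr
    intro q _
    simp [h0, h1]

-- ===== VERDICT (by name: the statement is the Claim_ definition above) =====
theorem split_levels_spec : Claim_equal_split_levels := by
  intro fields _
  exact split_levels_eq fields
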